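-- pv_equiv track=rewrite | github.com/camelids/ALPaCA | alpaca/morphing.py | match_sizes
-- ===== SOURCE A (Python) =====
-- class InvalidTarget(Exception):
--     """Raised when the original page cannot be morphed to the provided
--     target.
--     """
--     pass
--
-- def match_sizes(original_sizes, target_sizes):
--     """Decide which original size should be paded with which
--     target size.
--
--     Parameters
--     ----------
--     original_sizes : list of int
--         Sizes of original objects.
--     target_sizes : list of int
--         Sizes of target objects.
--     """
--     # Get indexes of sorted original_sizes, and sort target_sizes.
--     oi = sorted(range(len(original_sizes)), key=lambda x: original_sizes[x])
--     ts = sorted(target_sizes)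
--
--     pairs = []
--     remainders = [x for x in target_sizes]
--
--     for i in oi:
--         for j in range(len(ts)):
--             size = ts[j]
--             if original_sizes[i] <= size:
--                pairs.append((i, size))
--                remainders.remove(size)
--                # Remove previous j sizes
--                ts = ts[j+1:]
--                break
--         else:
--             raise InvalidTarget('Original page > Target page.')
--
--     return pairs, remainders
-- ===== SOURCE B (Python) =====
-- class InvalidTarget(Exception):
--     pass
--
-- def match_sizes(original_sizes, target_sizes):
--     # Two-pointer greedy over sorted targets; remainders rebuilt in one
--     # counting pass instead of repeated list.remove.
--     oi = sorted(range(len(original_sizes)), key=lambda x: original_sizes[x])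
--     ts = sorted(target_sizes)
--     m = len(ts)
--     pairs = []
--     used = {}  # matched size -> how many copies were consumed
--     p = 0
--     for i in oi:
--         v = original_sizes[i]
--         while p < m and ts[p] < v:
--             p += 1
--         if p == m:
--             raise InvalidTarget('Original page > Target page.')
--         s = ts[p]
--         pairs.append((i, s))
--         used[s] = used.get(s, 0) + 1
--         p += 1
--     remainders = []
--     for x in target_sizes:
--         c = used.get(x, 0)
--         if c:
--             used[x] = c - 1
--         else:
--             remainders.append(x)
--     return pairs, remainders
-- ===== Notes on version B (the rewrite author's own statement) =====
-- stated objective: faster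
-- what changed: Replaces A's per-original rescan with list slicing (ts = ts[j+1:]) and per-match remainders.remove by a single two-pointer sweep over the sorted targets plus a counting-dict one-pass rebuild of the remainders; Pre_ excludes exactly the inputs on which A raises InvalidTarget (B raises it there too).
import Mathlib
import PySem

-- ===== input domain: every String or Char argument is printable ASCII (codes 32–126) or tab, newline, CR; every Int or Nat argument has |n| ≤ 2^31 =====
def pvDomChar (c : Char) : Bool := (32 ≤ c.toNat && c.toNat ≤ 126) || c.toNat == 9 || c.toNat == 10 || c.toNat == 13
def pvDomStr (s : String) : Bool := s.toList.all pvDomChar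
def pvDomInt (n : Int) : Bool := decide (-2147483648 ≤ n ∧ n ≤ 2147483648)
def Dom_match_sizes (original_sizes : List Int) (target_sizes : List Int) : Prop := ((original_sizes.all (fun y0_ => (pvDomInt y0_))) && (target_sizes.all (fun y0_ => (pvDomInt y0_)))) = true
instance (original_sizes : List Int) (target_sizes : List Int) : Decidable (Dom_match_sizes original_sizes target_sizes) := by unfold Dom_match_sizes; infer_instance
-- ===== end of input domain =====

-- B replaces A's quadratic rescan/slice/list.remove greedy by a two-pointer sweep over the
-- sorted targets plus a one-pass counter rebuild of the remainders (equal return values;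
-- A's InvalidTarget raise is excluded by Pre_; on those inputs both ports return ([], [])).

-- ===== PORT A =====
-- inner 'for j in range(len(ts)): … break / else raise': first ts[j] with orig ≤ ts[j];
-- returns that size and ts[j+1:] (none = the for-else raise InvalidTarget)
def pvInnerA (v : Int) : List Int → Option (Int × List Int)
  | [] => none
  | s :: rest => if v ≤ s then some (s, rest) else pvInnerA v rest

-- the outer 'for i in oi' loop; 'remainders.remove(size)': remove? always succeeds on the
-- states this loop reaches (size was copied from remainders), so .getD rem is exact there
def pvLoopA (origs : List Int) : List Int → List Int → List (Int × Int) → List Int →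
    Option (List (Int × Int) × List Int)
  | [], _ts, pairs, rem => some (pairs, rem)
  | i :: oi, ts, pairs, rem =>
    match pvInnerA (PySem.List.pyGetD origs i 0) ts with
    | none => none
    | some (size, ts') =>
        pvLoopA origs oi ts' (pairs ++ [(i, size)]) ((PySem.List.remove? rem size).getD rem)

def match_sizes (original_sizes : List Int) (target_sizes : List Int) :
    (List (Int × Int)) × List Int :=
  let oi := PySem.List.sorted (PySem.List.pyRange 0 (original_sizes.length : Int) 1)
      (fun x => PySem.List.pyGetD original_sizes x 0)
  let ts := PySem.List.sorted target_sizes (fun x => x)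
  (pvLoopA original_sizes oi ts [] target_sizes).getD ([], [])

-- ===== PORT B =====
-- 'while p < len(ts) and ts[p] < v: p += 1'
def pvAdvance (v : Int) (ts : List Int) (p : Nat) : Nat :=
  if h : p < ts.length then (if ts[p] < v then pvAdvance v ts (p + 1) else p) else p
  termination_by ts.length - p

-- the 'for i in oi' loop of B: two-pointer over the fixed sorted ts, counting used sizes
def pvLoopB (origs ts : List Int) : List Int → Nat → List (Int × Int) → PySem.Dict Int Int →
    Option (List (Int × Int) × PySem.Dict Int Int)
  | [], _p, pairs, used => some (pairs, used)
  | i :: oi, p, pairs, used =>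
    let v := PySem.List.pyGetD origs i 0
    let q := pvAdvance v ts p
    if q = ts.length then none   -- raise InvalidTarget
    else
      let s := PySem.List.pyGetD ts (q : Int) 0
      pvLoopB origs ts oi (q + 1) (pairs ++ [(i, s)]) (used.insert s (used.getD s 0 + 1))

-- 'for x in target_sizes: c = used.get(x, 0); if c: used[x] = c - 1 else: remainders.append(x)'
def pvCPass (used : PySem.Dict Int Int) : List Int → List Int → List Int
  | [], acc => acc
  | x :: xs, acc =>
    let c := used.getD x 0
    if c ≠ 0 then pvCPass (used.insert x (c - 1)) xs acc
    else pvCPass used xs (acc ++ [x])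

def match_sizes_alt (original_sizes : List Int) (target_sizes : List Int) :
    (List (Int × Int)) × List Int :=
  let oi := PySem.List.sorted (PySem.List.pyRange 0 (original_sizes.length : Int) 1)
      (fun x => PySem.List.pyGetD original_sizes x 0)
  let ts := PySem.List.sorted target_sizes (fun x => x)
  match pvLoopB original_sizes ts oi 0 [] PySem.Dict.empty with
  | none => ([], [])   -- raise InvalidTarget
  | some (pairs, used) => (pairs, pvCPass used target_sizes [])

-- ===== PRECONDITION & SPEC =====
-- Pre_ excludes exactly the inputs on which A raises InvalidTarget: the k-th smallest original
-- must fit the k-th largest-aligned target (the classical matching condition for this greedy).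
def Pre_match_sizes (original_sizes : List Int) (target_sizes : List Int) : Prop :=
  original_sizes.length ≤ target_sizes.length ∧
  ∀ k < original_sizes.length,
    (PySem.List.sorted original_sizes (fun x => x)).getD k 0 ≤
    (PySem.List.sorted target_sizes (fun x => x)).getD
      (k + (target_sizes.length - original_sizes.length)) 0
instance (original_sizes : List Int) (target_sizes : List Int) :
    Decidable (Pre_match_sizes original_sizes target_sizes) := by
  unfold Pre_match_sizes; infer_instance

def pvWitness_match_sizes : List Int × List Int := ([2, 1], [1, 5, 3])

def Spec_match_sizes (original_sizes : List Int) (target_sizes : List Int) (out : (List (Int × Int)) × List Int) : Prop := out = match_sizes_alt original_sizes target_sizes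
instance (original_sizes : List Int) (target_sizes : List Int) (out : (List (Int × Int)) × List Int) : Decidable (Spec_match_sizes original_sizes target_sizes out) := by unfold Spec_match_sizes; infer_instance

-- ===== CLAIM (what is proved, stated in full; the proofs are below) =====
def Claim_equal_match_sizes : Prop := ∀ (original_sizes : List Int) (target_sizes : List Int), Dom_match_sizes original_sizes target_sizes → Pre_match_sizes original_sizes target_sizes → Spec_match_sizes original_sizes target_sizes (match_sizes original_sizes target_sizes)

-- ===== LEMMAS AND PROOFS =====
-- The equality A = B is in fact proved unconditionally: when the greedy fails (A raises,
-- excluded by Pre_) both ports return ([], []); Pre_ is carried only to exclude the raise.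

-- reference greedy: pairs plus the list of matched sizes, in match order
def pvGreedy (origs : List Int) : List Int → List Int → Option (List (Int × Int) × List Int)
  | [], _ => some ([], [])
  | i :: oi, ts =>
    match pvInnerA (PySem.List.pyGetD origs i 0) ts with
    | none => none
    | some (s, ts') => (pvGreedy origs oi ts').map (fun r => ((i, s) :: r.1, s :: r.2))

def pvRemoveFirst (xs : List Int) (s : Int) : List Int := (PySem.List.remove? xs s).getD xs

def pvBump (d : PySem.Dict Int Int) (s : Int) : PySem.Dict Int Int := d.insert s (d.getD s 0 + 1)

theorem pvLoopA_eq_greedy (origs : List Int) (oi ts : List Int) (pairs : List (Int × Int))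
    (rem : List Int) :
    pvLoopA origs oi ts pairs rem =
      (pvGreedy origs oi ts).map (fun r => (pairs ++ r.1, r.2.foldl pvRemoveFirst rem)) := by
  induction oi generalizing ts pairs rem with
  | nil => simp [pvLoopA, pvGreedy]
  | cons i oi ih =>
    simp only [pvLoopA, pvGreedy]
    cases pvInnerA (PySem.List.pyGetD origs i 0) ts with
    | none => simp
    | some r =>
      obtain ⟨sz, ts'⟩ := r
      simp only [ih]
      cases pvGreedy origs oi ts' with
      | none => simp
      | some r' => simp [pvRemoveFirst]

theorem pvAdvance_le (v : Int) (ts : List Int) (p : Nat) (h : p ≤ ts.length) :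
    pvAdvance v ts p ≤ ts.length := by
  fun_induction pvAdvance with
  | case1 p h hlt ih => exact ih (by omega)
  | case2 p h hlt => omega
  | case3 p h' => omega

theorem pvInnerA_drop (v : Int) (ts : List Int) (p : Nat) :
    pvInnerA v (ts.drop p) =
      if h : pvAdvance v ts p < ts.length then
        some (ts[pvAdvance v ts p], ts.drop (pvAdvance v ts p + 1))
      else none := by
  fun_induction pvAdvance v ts p with
  | case1 p h hlt ih =>
    rw [List.drop_eq_getElem_cons h]
    simp only [pvInnerA]
    rw [if_neg (by omega)]
    exact ih
  | case2 p h hlt =>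
    rw [List.drop_eq_getElem_cons h]
    simp only [pvInnerA]
    rw [if_pos (by omega), dif_pos h]
  | case3 p h =>
    rw [List.drop_of_length_le (by omega)]
    simp only [pvInnerA]
    rw [dif_neg h]

theorem pvLoopB_eq_greedy (origs ts : List Int) (oi : List Int) (p : Nat)
    (pairs : List (Int × Int)) (used : PySem.Dict Int Int) (hp : p ≤ ts.length) :
    pvLoopB origs ts oi p pairs used =
      (pvGreedy origs oi (ts.drop p)).map (fun r => (pairs ++ r.1, r.2.foldl pvBump used)) := by
  induction oi generalizing p pairs used with
  | nil => simp [pvLoopB, pvGreedy]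
  | cons i oi ih =>
    simp only [pvLoopB, pvGreedy]
    have hq_le : pvAdvance (PySem.List.pyGetD origs i 0) ts p ≤ ts.length :=
      pvAdvance_le _ _ _ hp
    rw [pvInnerA_drop]
    by_cases hq : pvAdvance (PySem.List.pyGetD origs i 0) ts p = ts.length
    · rw [if_pos hq, dif_neg (by omega)]
      simp
    · rw [if_neg hq, dif_pos (by omega)]
      have hlt : pvAdvance (PySem.List.pyGetD origs i 0) ts p < ts.length := by omega
      have hs : PySem.List.pyGetD ts ((pvAdvance (PySem.List.pyGetD origs i 0) ts p : Nat) : Int) 0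
          = ts[pvAdvance (PySem.List.pyGetD origs i 0) ts p] := by
        rw [PySem.List.pyGetD_natCast]
        exact List.getD_eq_getElem _ _ hlt
      rw [hs, ih _ _ _ (by omega)]
      cases hg : pvGreedy origs oi (ts.drop (pvAdvance (PySem.List.pyGetD origs i 0) ts p + 1)) with
      | none => simp [hg]
      | some r => simp [hg, pvBump]

theorem pvCPass_ext (xs : List Int) (d d' : PySem.Dict Int Int)
    (h : ∀ k, d.getD k 0 = d'.getD k 0) (acc : List Int) :
    pvCPass d xs acc = pvCPass d' xs acc := by
  induction xs generalizing d d' acc with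
  | nil => rfl
  | cons x xs ih =>
    simp only [pvCPass, h x]
    split_ifs with hc
    · exact ih _ _ (fun k => by by_cases hk : k = x <;>
        simp [PySem.Dict.getD_insert, hk, h k]) _
    · exact ih _ _ h _

theorem pvCPass_zero (xs : List Int) (d : PySem.Dict Int Int)
    (h : ∀ k, d.getD k 0 = 0) (acc : List Int) :
    pvCPass d xs acc = acc ++ xs := by
  induction xs generalizing acc with
  | nil => simp [pvCPass]
  | cons x xs ih =>
    simp only [pvCPass, h x]
    rw [if_neg (by simp), ih]
    simp

theorem pvRemoveFirst_cons_of_ne (x s : Int) (xs : List Int) (h : x ≠ s) :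
    pvRemoveFirst (x :: xs) s = x :: pvRemoveFirst xs s := by
  unfold pvRemoveFirst
  rw [show PySem.List.remove? (x :: xs) s = (PySem.List.remove? xs s).map (x :: ·) from
    PySem.List.remove?_cons_of_ne xs h]
  cases hr : PySem.List.remove? xs s <;> simp

theorem pvCPass_bump (xs : List Int) (d : PySem.Dict Int Int) (s : Int)
    (hs : 0 ≤ d.getD s 0) (acc : List Int) :
    pvCPass (pvBump d s) xs acc = pvCPass d (pvRemoveFirst xs s) acc := by
  induction xs generalizing d hs acc with
  | nil => simp [pvCPass, pvRemoveFirst, PySem.List.remove?]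
  | cons x xs ih =>
    by_cases hxs : x = s
    · subst hxs
      have hr : pvRemoveFirst (x :: xs) x = xs := by simp [pvRemoveFirst]
      rw [hr]
      simp only [pvCPass]
      have h1 : (pvBump d x).getD x 0 = d.getD x 0 + 1 := by
        simp [pvBump]
      rw [h1, if_pos (by omega)]
      apply pvCPass_ext
      intro k
      by_cases hk : k = x <;> simp [pvBump, PySem.Dict.getD_insert, hk]
    · rw [pvRemoveFirst_cons_of_ne x s xs (fun h => hxs h)]
      simp only [pvCPass]
      have h2 : (pvBump d s).getD x 0 = d.getD x 0 := by
        simp [pvBump, PySem.Dict.getD_insert, hxs]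
      rw [h2]
      by_cases hc : d.getD x 0 ≠ 0
      · rw [if_pos hc, if_pos hc]
        rw [pvCPass_ext xs ((pvBump d s).insert x (d.getD x 0 - 1))
              (pvBump (d.insert x (d.getD x 0 - 1)) s)
              (fun k => by
                by_cases hk : k = s
                · simp [pvBump, PySem.Dict.getD_insert, hk, Ne.symm hxs]
                · by_cases hk' : k = x <;>
                    simp [pvBump, PySem.Dict.getD_insert, hk, hk', hxs]) acc]
        exact ih _ (by simp [PySem.Dict.getD_insert, Ne.symm hxs, hs]) _
      · rw [if_neg hc, if_neg hc]
        exact ih _ hs _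

theorem pvRemoveFirst_comm (xs : List Int) (a b : Int) :
    pvRemoveFirst (pvRemoveFirst xs a) b = pvRemoveFirst (pvRemoveFirst xs b) a := by
  by_cases hab : a = b
  · subst hab; rfl
  · have e1 : ∀ (c : Int) (ys : List Int), pvRemoveFirst (c :: ys) c = ys := by
      intro c ys; simp [pvRemoveFirst]
    induction xs with
    | nil => simp [pvRemoveFirst, PySem.List.remove?]
    | cons x xs ih =>
      by_cases hxa : x = a
      · subst hxa
        rw [e1, pvRemoveFirst_cons_of_ne x b xs hab, e1]
      · by_cases hxb : x = b
        · subst hxb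
          rw [pvRemoveFirst_cons_of_ne x a xs hxa, e1, e1]
        · rw [pvRemoveFirst_cons_of_ne x a xs hxa, pvRemoveFirst_cons_of_ne x b _ hxb,
            pvRemoveFirst_cons_of_ne x b xs hxb, pvRemoveFirst_cons_of_ne x a _ hxa, ih]

theorem pvRemoveFirst_foldl_comm (ms : List Int) (xs : List Int) (s : Int) :
    pvRemoveFirst (ms.foldl pvRemoveFirst xs) s = ms.foldl pvRemoveFirst (pvRemoveFirst xs s) := by
  induction ms generalizing xs with
  | nil => rfl
  | cons m ms ih =>
    simp only [List.foldl_cons]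
    rw [ih, pvRemoveFirst_comm]

theorem pvCPass_fold (ms : List Int) (d : PySem.Dict Int Int) (xs : List Int)
    (h : ∀ k, 0 ≤ d.getD k 0) (acc : List Int) :
    pvCPass (ms.foldl pvBump d) xs acc = pvCPass d (ms.foldl pvRemoveFirst xs) acc := by
  induction ms generalizing d h xs acc with
  | nil => rfl
  | cons m ms ih =>
    have hb : ∀ k, 0 ≤ (pvBump d m).getD k 0 := by
      intro k
      by_cases hk : k = m
      · have := h m; simp [pvBump, hk]; omega
      · simpa [pvBump, PySem.Dict.getD_insert, hk] using h k
    calc pvCPass ((m :: ms).foldl pvBump d) xs acc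
        = pvCPass (ms.foldl pvBump (pvBump d m)) xs acc := by simp only [List.foldl_cons]
      _ = pvCPass (pvBump d m) (ms.foldl pvRemoveFirst xs) acc := by apply ih; exact hb
      _ = pvCPass d (pvRemoveFirst (ms.foldl pvRemoveFirst xs) m) acc :=
          pvCPass_bump _ d m (h m) acc
      _ = pvCPass d (ms.foldl pvRemoveFirst (pvRemoveFirst xs m)) acc := by
          rw [pvRemoveFirst_foldl_comm]
      _ = pvCPass d ((m :: ms).foldl pvRemoveFirst xs) acc := by simp only [List.foldl_cons]

theorem match_sizes_eq_alt (original_sizes target_sizes : List Int) :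
    match_sizes original_sizes target_sizes = match_sizes_alt original_sizes target_sizes := by
  simp only [match_sizes, match_sizes_alt]
  rw [pvLoopA_eq_greedy,
    pvLoopB_eq_greedy original_sizes (PySem.List.sorted target_sizes (fun x => x))
      (PySem.List.sorted (PySem.List.pyRange 0 (original_sizes.length : Int) 1)
        (fun x => PySem.List.pyGetD original_sizes x 0)) 0 [] PySem.Dict.empty (Nat.zero_le _)]
  simp only [List.drop_zero]
  cases hg : pvGreedy original_sizes
      (PySem.List.sorted (PySem.List.pyRange 0 (original_sizes.length : Int) 1)
        (fun x => PySem.List.pyGetD original_sizes x 0))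
      (PySem.List.sorted target_sizes (fun x => x)) with
  | none => simp
  | some r =>
    simp only [Option.map_some, Option.getD_some, List.nil_append]
    rw [pvCPass_fold r.2 PySem.Dict.empty target_sizes
        (fun k => by simp [PySem.Dict.getD_empty]) [],
      pvCPass_zero _ PySem.Dict.empty
        (fun k => by simp [PySem.Dict.getD_empty]) []]
    simp

-- ===== VERDICT (by name: the statement is the Claim_ definition above) =====
theorem match_sizes_spec : Claim_equal_match_sizes := by
  intro o t _ _
  unfold Spec_match_sizes
  exact match_sizes_eq_alt o t
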